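-- pv_equiv track=rewrite | github.com/mvrogozov/algorithms | contest/yny_algo/7/74966/74966_D_max_update.py | make_arr
-- ===== SOURCE A (Python) =====
-- def make_arr(n, data):
--     n = int(n)
--     data = list(map(int, data.split()))
--     pow2 = 1 << (n-1).bit_length()
--     data = [(v, i) for i, v in enumerate(data)]
--     arr = [(-1, -1)] * (pow2 * 2 - 1)
--     arr[-pow2: -(pow2-n)] = data
--     for i in range(pow2 - 2, -1, -1):
--         arr[i] = max(arr[i * 2 + 1], arr[i * 2 + 2])
--     return arr
-- ===== SOURCE B (Python) =====
-- def make_arr(n, data):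
--     n = int(n)
--     size = 1 << (n - 1).bit_length()
--     arr = [(-1, -1)] * (size * 2 - 1)
--     arr[-size: -(size - n)] = [(int(v), i) for i, v in enumerate(data.split())]
--
--     def build(i):
--         if i >= size - 1:
--             return arr[i]
--         arr[i] = max(build(2 * i + 1), build(2 * i + 2))
--         return arr[i]
--
--     build(0)
--     return arr
-- ===== Notes on version B (the rewrite author's own statement) =====
-- stated objective: alternative
-- what changed: A's descending bottom-up index loop is replaced by a recursive post-order build(0) that computes each internal node from its two children by depth-first traversal from the root; Pre_ excludes only inputs where A raises (unparsable token, or fewer tokens than n when 0 < n < pow2).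
import Mathlib
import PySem

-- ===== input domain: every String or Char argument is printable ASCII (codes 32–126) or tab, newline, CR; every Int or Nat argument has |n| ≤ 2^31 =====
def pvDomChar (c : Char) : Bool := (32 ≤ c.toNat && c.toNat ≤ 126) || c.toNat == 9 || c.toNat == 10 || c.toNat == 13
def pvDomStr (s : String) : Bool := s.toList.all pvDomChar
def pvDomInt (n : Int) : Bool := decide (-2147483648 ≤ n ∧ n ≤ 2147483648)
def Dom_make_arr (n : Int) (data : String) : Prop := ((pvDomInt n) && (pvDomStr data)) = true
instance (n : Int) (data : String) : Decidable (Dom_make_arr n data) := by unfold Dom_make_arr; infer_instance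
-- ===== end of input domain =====

-- B replaces A's descending bottom-up index loop by a recursive post-order build from the root;
-- the array construction (slice assignment of the leaves) is the same. Same values, different traversal.

-- Python max(x, y) on int pairs (lexicographic; keeps the first argument unless the second is larger)
def pymaxPair (a b : Int × Int) : Int × Int :=
  if a.1 < b.1 ∨ (a.1 = b.1 ∧ a.2 < b.2) then b else a

-- Python slice-endpoint resolution for a list of length L (exact: negative counts from the end, clamped)
def sliceIdx (L e : Int) : Int := if e < 0 then max 0 (L + e) else min e L

-- ===== PORT A =====
-- one iteration of A's loop body: arr[i] = max(arr[i*2+1], arr[i*2+2])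
def stepA (arr : List (Int × Int)) (i : Int) : List (Int × Int) :=
  PySem.List.pySetD arr i
    (pymaxPair (PySem.List.pyGetD arr (i * 2 + 1) (-1, -1)) (PySem.List.pyGetD arr (i * 2 + 2) (-1, -1)))

def make_arr (n : Int) (data : String) : List (Int × Int) :=
  let vals : List Int := (PySem.Str.split₀ data).map (fun t => (PySem.Int.ofStr? t).getD 0)
  let pow2 : Int := 1 <<< PySem.Int.bitLength (n - 1)
  let leaves : List (Int × Int) := (PySem.List.enumerate vals 0).map (fun p => (p.2, p.1))
  let arr0 : List (Int × Int) := List.replicate (pow2 * 2 - 1).toNat (-1, -1)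
  -- slice assignment arr[-pow2 : -(pow2 - n)] = leaves  (exact: Python endpoint resolution, then splice;
  -- the end index never resolves below the start, so `max start` is Python's clamp of an empty slice)
  let L : Int := (arr0.length : Int)
  let start : Int := sliceIdx L (-pow2)
  let stop : Int := max start (sliceIdx L (-(pow2 - n)))
  let arr1 : List (Int × Int) := arr0.take start.toNat ++ leaves ++ arr0.drop stop.toNat
  (PySem.List.pyRange (pow2 - 2) (-1) (-1)).foldl stepA arr1

-- ===== PORT B =====
-- build(i) of Source B: post-order recursion; leaf slots (i ≥ size-1) read the spliced array, internal
-- nodes take the max of their two children (each internal slot is written once, from final children,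
-- so build i's value depends only on the original leaf slots — ported as this pure recursion;
-- fuel only makes the recursion structural: the tree depth is below the fuel `size` it is called with)
def buildVal (p : Nat) (arr : List (Int × Int)) (fuel : Nat) (i : Nat) : Int × Int :=
  if p - 1 ≤ i then PySem.List.pyGetD arr (i : Int) (-1, -1)
  else
    match fuel with
    | 0 => (-1, -1)
    | f + 1 => pymaxPair (buildVal p arr f (2 * i + 1)) (buildVal p arr f (2 * i + 2))

def make_arr_alt (n : Int) (data : String) : List (Int × Int) :=
  let size : Int := 1 <<< PySem.Int.bitLength (n - 1)
  let arr0 : List (Int × Int) := List.replicate (size * 2 - 1).toNat (-1, -1)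
  -- slice assignment arr[-size : -(size - n)] = [(int(v), i) …] (same Python construct as in A's port)
  let leaves : List (Int × Int) :=
    (PySem.List.enumerate (PySem.Str.split₀ data) 0).map (fun p => ((PySem.Int.ofStr? p.2).getD 0, p.1))
  let L : Int := (arr0.length : Int)
  let start : Int := sliceIdx L (-size)
  let stop : Int := max start (sliceIdx L (-(size - n)))
  let arr : List (Int × Int) := arr0.take start.toNat ++ leaves ++ arr0.drop stop.toNat
  -- build(0) writes exactly the internal slots 0 … size-2; the rest of arr is returned unchanged
  (List.range (size - 1).toNat).map (buildVal size.toNat arr size.toNat) ++ arr.drop (size - 1).toNat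

-- ===== PRECONDITION & SPEC =====
-- Pre_ excludes exactly the inputs on which A raises: a token int() rejects (ValueError), or
-- 0 < n < pow2 with fewer than n tokens (the loop then reads past the shrunken array: IndexError).
def Pre_make_arr (n : Int) (data : String) : Prop :=
  (∀ t ∈ PySem.Str.split₀ data, (PySem.Int.ofStr? t).isSome = true) ∧
  ¬(0 < n ∧ n < 1 <<< PySem.Int.bitLength (n - 1) ∧
      ((PySem.Str.split₀ data).length : Int) < n)
instance (n : Int) (data : String) : Decidable (Pre_make_arr n data) := by
  unfold Pre_make_arr; infer_instance

def pvWitness_make_arr : Int × String := (3, "5 1 7")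

def Spec_make_arr (n : Int) (data : String) (out : List (Int × Int)) : Prop := out = make_arr_alt n data
instance (n : Int) (data : String) (out : List (Int × Int)) : Decidable (Spec_make_arr n data out) := by
  unfold Spec_make_arr; infer_instance

-- ===== CLAIM (what is proved, stated in full; the proofs are below) =====
def Claim_equal_make_arr : Prop :=
  ∀ (n : Int) (data : String), Dom_make_arr n data → Pre_make_arr n data →
    Spec_make_arr n data (make_arr n data)

-- ===== LEMMAS AND PROOFS =====

-- pow2 = 1 << (n-1).bit_length() is an upper bound for n
theorem le_pow2 (n : Int) (h : 0 < n) : n ≤ (2 : Int) ^ PySem.Int.bitLength (n - 1) := by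
  have h1 := PySem.Int.lt_two_pow_bitLength (n - 1)
  have h2 : (n - 1).natAbs = (n - 1).toNat := by omega
  have h3 : (n - 1).toNat < 2 ^ PySem.Int.bitLength (n - 1) := by omega
  have h4 := (Nat.cast_lt (α := Int)).mpr h3
  push_cast at h4
  omega

theorem enumerate_map {α β : Type} (f : α → β) (xs : List α) : ∀ (s : Int),
    PySem.List.enumerate (xs.map f) s = (PySem.List.enumerate xs s).map (fun p => (p.1, f p.2)) := by
  induction xs with
  | nil => intro s; simp [PySem.List.enumerate_nil]
  | cons x xs ih => intro s; simp [PySem.List.enumerate_cons, ih]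

-- the two ports build the same leaf list
theorem leaves_eq (data : String) :
    (PySem.List.enumerate ((PySem.Str.split₀ data).map (fun t => (PySem.Int.ofStr? t).getD 0)) 0).map
        (fun p => (p.2, p.1)) =
    (PySem.List.enumerate (PySem.Str.split₀ data) 0).map
        (fun p => ((PySem.Int.ofStr? p.2).getD 0, p.1)) := by
  rw [enumerate_map, List.map_map]
  rfl

theorem buildVal_leaf (P : Nat) (base : List (Int × Int)) (f k : Nat) (h : P - 1 ≤ k)
    (hk : k < base.length) : buildVal P base f k = base[k] := by
  rw [buildVal.eq_def, if_pos h, PySem.List.pyGetD_natCast, List.getD_eq_getElem _ _ hk]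

-- the fuel is irrelevant as long as it dominates the remaining tree depth
theorem buildVal_fuel (P : Nat) (base : List (Int × Int)) : ∀ (f g i : Nat),
    P - 1 - i ≤ f → P - 1 - i ≤ g → buildVal P base f i = buildVal P base g i := by
  intro f
  induction f with
  | zero =>
    intro g i hf _
    have h : P - 1 ≤ i := by omega
    rw [buildVal.eq_def, if_pos h, buildVal.eq_def, if_pos h]
  | succ f ih =>
    intro g i hf hg
    by_cases h : P - 1 ≤ i
    · rw [buildVal.eq_def, if_pos h, buildVal.eq_def, if_pos h]
    · obtain ⟨g', rfl⟩ : ∃ g', g = g' + 1 := ⟨g - 1, by omega⟩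
      rw [buildVal.eq_def, if_neg h]
      conv_rhs => rw [buildVal.eq_def, if_neg h]
      simp only []
      rw [ih g' (2 * i + 1) (by omega) (by omega), ih g' (2 * i + 2) (by omega) (by omega)]

theorem buildVal_node (P : Nat) (base : List (Int × Int)) (i : Nat) (hP : 1 ≤ P)
    (h : ¬ (P - 1 ≤ i)) :
    buildVal P base P i =
      pymaxPair (buildVal P base P (2 * i + 1)) (buildVal P base P (2 * i + 2)) := by
  obtain ⟨Q, rfl⟩ : ∃ Q, P = Q + 1 := ⟨P - 1, by omega⟩
  rw [buildVal.eq_def, if_neg h]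
  simp only []
  rw [buildVal_fuel _ _ Q (Q + 1) (2 * i + 1) (by omega) (by omega),
      buildVal_fuel _ _ Q (Q + 1) (2 * i + 2) (by omega) (by omega)]

-- every slot of B's result list holds buildVal of its index
theorem target_getElem (P : Nat) (base : List (Int × Int)) (k : Nat) (hk : k < base.length) :
    ((List.range (P - 1)).map (buildVal P base P) ++ base.drop (P - 1))[k]? =
      some (buildVal P base P k) := by
  by_cases h : k < P - 1
  · rw [List.getElem?_append_left (by simpa using h)]
    simp [List.getElem?_map, List.getElem?_range h]
  · rw [List.getElem?_append_right (by simpa using Nat.le_of_not_lt h)]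
    simp only [List.length_map, List.length_range]
    rw [List.getElem?_drop]
    have : P - 1 + (k - (P - 1)) = k := by omega
    rw [this, List.getElem?_eq_getElem hk, buildVal_leaf P base P k (by omega) hk]

theorem getD_of_some {A : List (Int × Int)} {k : Nat} {v d : Int × Int} (h : A[k]? = some v) :
    A.getD k d = v := by simp [List.getD, h]

-- the loop invariant: folding stepA over [m-1, …, 0] turns any array that is already
-- final at the slots ≥ m into B's result list
theorem loop_inv (P : Nat) (base : List (Int × Int)) (hP : 1 ≤ P) (hlen : 2 * P - 1 ≤ base.length) :
    ∀ (m : Nat), m ≤ P - 1 → ∀ (A : List (Int × Int)), A.length = base.length →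
      (∀ k, m ≤ k → k < base.length → A[k]? = some (buildVal P base P k)) →
      (PySem.List.pyRange ((m : Int) - 1) (-1) (-1)).foldl stepA A =
        (List.range (P - 1)).map (buildVal P base P) ++ base.drop (P - 1) := by
  intro m
  induction m with
  | zero =>
    intro _ A hA hinv
    rw [show ((0 : Nat) : Int) - 1 = -1 by norm_num, PySem.List.pyRange_neg_one_eq_nil (by norm_num)]
    simp only [List.foldl_nil]
    apply List.ext_getElem?
    intro k
    by_cases hk : k < base.length
    · rw [hinv k (Nat.zero_le k) hk, target_getElem P base k hk]
    · rw [List.getElem?_eq_none (by omega), List.getElem?_eq_none]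
      simp only [List.length_append, List.length_map, List.length_range, List.length_drop]
      omega
  | succ m ih =>
    intro hm A hA hinv
    rw [show ((m + 1 : Nat) : Int) - 1 = (m : Int) by push_cast; ring,
        PySem.List.pyRange_neg_one_cons (by omega), List.foldl_cons]
    have hc1 : 2 * m + 1 < base.length := by omega
    have hc2 : 2 * m + 2 < base.length := by omega
    have e1 : PySem.List.pyGetD A ((m : Int) * 2 + 1) (-1, -1) = buildVal P base P (2 * m + 1) := by
      rw [show ((m : Int)) * 2 + 1 = ((2 * m + 1 : Nat) : Int) by push_cast; ring,
          PySem.List.pyGetD_natCast]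
      exact getD_of_some (hinv _ (by omega) hc1)
    have e2 : PySem.List.pyGetD A ((m : Int) * 2 + 2) (-1, -1) = buildVal P base P (2 * m + 2) := by
      rw [show ((m : Int)) * 2 + 2 = ((2 * m + 2 : Nat) : Int) by push_cast; ring,
          PySem.List.pyGetD_natCast]
      exact getD_of_some (hinv _ (by omega) hc2)
    have hstep : stepA A (m : Int) = A.set m (buildVal P base P m) := by
      rw [stepA, e1, e2, PySem.List.pySetD_natCast, ← buildVal_node P base m hP (by omega)]
    rw [hstep]
    apply ih (by omega) _ (by simpa using hA)
    intro k hk hklen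
    by_cases hkm : k = m
    · subst hkm
      rw [List.getElem?_set_self (by omega)]
    · rw [List.getElem?_set_ne (by omega)]
      exact hinv k (by omega) hklen

-- the whole equivalence, with pow2 abstracted to P ≥ 1 and the leaf list to `leaves`
theorem main_core (P : Nat) (leaves : List (Int × Int)) (hP1 : 1 ≤ P) (n : Int)
    (hle : 0 < n → n ≤ (P : Int))
    (hsz : ¬(0 < n ∧ n < (P : Int) ∧ (leaves.length : Int) < n)) :
    (let arr0 : List (Int × Int) := List.replicate ((P : Int) * 2 - 1).toNat (-1, -1)
     let L : Int := (arr0.length : Int)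
     let start : Int := sliceIdx L (-(P : Int))
     let stop : Int := max start (sliceIdx L (-((P : Int) - n)))
     let arr1 : List (Int × Int) := arr0.take start.toNat ++ leaves ++ arr0.drop stop.toNat
     (PySem.List.pyRange ((P : Int) - 2) (-1) (-1)).foldl stepA arr1) =
    (let arr0 : List (Int × Int) := List.replicate ((P : Int) * 2 - 1).toNat (-1, -1)
     let L : Int := (arr0.length : Int)
     let start : Int := sliceIdx L (-(P : Int))
     let stop : Int := max start (sliceIdx L (-((P : Int) - n)))
     let arr : List (Int × Int) := arr0.take start.toNat ++ leaves ++ arr0.drop stop.toNat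
     (List.range ((P : Int) - 1).toNat).map (buildVal ((P : Int)).toNat arr ((P : Int)).toNat) ++
       arr.drop ((P : Int) - 1).toNat) := by
  simp only []
  have t0 : ((P : Int) * 2 - 1).toNat = 2 * P - 1 := by omega
  have tL : ((List.replicate ((P : Int) * 2 - 1).toNat ((-1 : Int), (-1 : Int))).length : Int) =
      ((2 * P - 1 : Nat) : Int) := by simp [t0]
  have t2 : ((P : Int) - 1).toNat = P - 1 := by omega
  have t3 : ((P : Int)).toNat = P := by omega
  have hstart : sliceIdx ((2 * P - 1 : Nat) : Int) (-(P : Int)) = ((P - 1 : Nat) : Int) := by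
    unfold sliceIdx; split_ifs <;> omega
  -- the resolved stop index lies between P-1 and P-1 + leaves.length: the splice never shrinks
  -- the array below 2P-1
  have hstop : (P - 1 : Int) ≤ max (((P - 1 : Nat) : Int)) (sliceIdx ((2 * P - 1 : Nat) : Int) (-((P : Int) - n))) ∧
      (max (((P - 1 : Nat) : Int)) (sliceIdx ((2 * P - 1 : Nat) : Int) (-((P : Int) - n)))) - (P - 1 : Int) ≤ (leaves.length : Int) := by
    have hnP : n ≤ (P : Int) := by
      by_cases h0 : 0 < n
      · exact hle h0
      · omega
    by_cases hc : 0 < n ∧ n < (P : Int)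
    · have hlen : n ≤ (leaves.length : Int) := by omega
      unfold sliceIdx; split_ifs <;> constructor <;> omega
    · have : n ≤ 0 ∨ n = (P : Int) := by omega
      unfold sliceIdx
      rcases this with h | h <;> split_ifs <;> constructor <;> omega
  set stop : Int := max (((P - 1 : Nat) : Int)) (sliceIdx ((2 * P - 1 : Nat) : Int) (-((P : Int) - n))) with hsdef
  rw [tL, hstart, t0, t2, t3]
  set arr : List (Int × Int) :=
    (List.replicate (2 * P - 1) ((-1 : Int), (-1 : Int))).take (((P - 1 : Nat) : Int)).toNat ++ leaves ++
      (List.replicate (2 * P - 1) ((-1 : Int), (-1 : Int))).drop stop.toNat with hadef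
  have hlen : 2 * P - 1 ≤ arr.length := by
    rw [hadef]
    simp only [List.length_append, List.length_take, List.length_replicate, List.length_drop]
    omega
  rw [show (P : Int) - 2 = (((P - 1 : Nat) : Int)) - 1 by omega]
  apply loop_inv P arr hP1 hlen (P - 1) (le_refl _) arr rfl
  intro k hk hklen
  rw [buildVal_leaf P arr P k hk hklen, List.getElem?_eq_getElem hklen]

-- ===== VERDICT (by name: the statement is the Claim_ definition above) =====
theorem make_arr_spec : Claim_equal_make_arr := by
  intro n data _ hpre
  obtain ⟨hparse, hsize⟩ := hpre
  unfold Spec_make_arr make_arr make_arr_alt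
  simp only []
  rw [leaves_eq data]
  have hn : (1 <<< PySem.Int.bitLength (n - 1) : Nat) = 2 ^ PySem.Int.bitLength (n - 1) := by
    rw [Nat.shiftLeft_eq, one_mul]
  rw [hn] at hsize ⊢
  apply main_core (2 ^ PySem.Int.bitLength (n - 1)) _ Nat.one_le_two_pow n
  · intro h0
    have := le_pow2 n h0
    push_cast
    omega
  · simpa [PySem.List.length_enumerate] using hsize
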